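-- pv_equiv track=rewrite | github.com/EimantasBlazevicius/PythonLeaning | partTwo/Module 3/PartTwoModule3.py | word_mixer
-- ===== SOURCE A (Python) =====
-- def word_mixer(tempList):
--     returnValue = []
--     internalList = sorted(tempList)
--     while len(internalList) > 5:
--         returnValue.append(internalList.pop(-5))
--         returnValue.append(internalList.pop(0))
--         returnValue.append(internalList.pop())
--     #return list value
--     return returnValue
-- ===== SOURCE B (Python) =====
-- def word_mixer(tempList):
--     s = sorted(tempList)
--     out = []
--     i, j = 0, len(s)  # s[i:j] is the untouched middle; window holds the current last <=5 elements
--     window = []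
--     while (j - i) + len(window) > 5:
--         while len(window) < 5 and j > i:
--             j -= 1
--             window.insert(0, s[j])
--         out.append(window.pop(0))   # == internalList.pop(-5)
--         out.append(s[i]); i += 1    # == internalList.pop(0)
--         out.append(window.pop())    # == internalList.pop()
--     return out
-- ===== Notes on version B (the rewrite author's own statement) =====
-- stated objective: faster
-- what changed: Replaces the quadratic pop-based while loop (pop(-5)/pop(0)/pop() each shifting the list) by two pointers into the sorted list plus a fixed-size <=5-element trailing window, making every pop O(1).
import Mathlib
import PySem

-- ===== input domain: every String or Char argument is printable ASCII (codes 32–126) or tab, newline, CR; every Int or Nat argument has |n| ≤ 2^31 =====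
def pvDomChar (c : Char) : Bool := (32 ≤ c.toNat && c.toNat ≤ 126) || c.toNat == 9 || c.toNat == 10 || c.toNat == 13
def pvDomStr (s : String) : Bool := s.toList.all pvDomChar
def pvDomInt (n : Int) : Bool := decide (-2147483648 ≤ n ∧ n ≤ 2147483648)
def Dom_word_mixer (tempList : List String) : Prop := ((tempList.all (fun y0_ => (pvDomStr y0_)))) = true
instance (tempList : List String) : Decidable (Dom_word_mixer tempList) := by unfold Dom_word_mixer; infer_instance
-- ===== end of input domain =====

-- B replaces A's quadratic pop-based loop by two pointers plus a ≤5-element trailing window (O(1) per pop).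

-- ===== PORT A =====
-- A's while loop: pop(-5), pop(0), pop() while the list is longer than 5.
def wmLoopA (internal : List String) (ret : List String) : List String :=
  if internal.length > 5 then
    match h5 : PySem.List.pop? internal (-5) with
    | none => ret
    | some (a, l1) =>
      match h0 : PySem.List.pop? l1 0 with
      | none => ret
      | some (b, l2) =>
        match h1 : PySem.List.pop? l2 (-1) with
        | none => ret
        | some (c, l3) => wmLoopA l3 (ret ++ [a, b, c])
  else ret
termination_by internal.length
decreasing_by
  have e5 : l1.length + 1 = internal.length := PySem.List.length_of_pop?_eq_some _ h5
  have e0 : l2.length + 1 = l1.length := PySem.List.length_of_pop?_eq_some _ h0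
  have e1 : l3.length + 1 = l2.length := PySem.List.length_of_pop?_eq_some _ h1
  omega

def word_mixer (tempList : List String) : List String :=
  wmLoopA (PySem.List.sorted tempList (fun x => x) false) []

-- ===== PORT B =====
-- B's inner refill loop: while len(window) < 5 and j > i: j -= 1; window.insert(0, s[j])
-- (s[j] is ported as s.getD j ""; the index is in range whenever the loop body runs in Python).
def wmRefill (s : List String) (i j : Nat) (win : List String) : Nat × List String :=
  if win.length < 5 ∧ i < j then
    wmRefill s i (j - 1) (s.getD (j - 1) "" :: win)
  else (j, win)
termination_by 5 - win.length

-- measure fact wmLoopB's termination cites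
theorem wmRefill_measure (s : List String) (i j : Nat) (win : List String) :
    (wmRefill s i j win).1 ≤ j ∧
      ((wmRefill s i j win).1 - i) + (wmRefill s i j win).2.length ≤ (j - i) + win.length := by
  fun_induction wmRefill s i j win with
  | case1 j win hc ih => simp only [List.length_cons] at ih ⊢; omega
  | case2 j win hc => simp

-- B's outer loop over pointers i, j and the trailing window.
def wmLoopB (s : List String) (i j : Nat) (win out : List String) : List String :=
  if (j - i) + win.length > 5 then
    match hr : wmRefill s i j win with
    | (j', win') =>
      match win' with
      | [] => out
      | a :: wrest =>
        wmLoopB s (i + 1) j' wrest.dropLast (out ++ [a, s.getD i "", wrest.getLastD ""])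
  else out
termination_by (j - i) + win.length
decreasing_by
  have hm := wmRefill_measure s i j win
  rw [hr] at hm
  simp only [List.length_cons, List.length_dropLast] at hm ⊢
  omega

def word_mixer_alt (tempList : List String) : List String :=
  let s := PySem.List.sorted tempList (fun x => x) false
  wmLoopB s 0 s.length [] []

-- ===== PRECONDITION & SPEC =====
def Spec_word_mixer (tempList : List String) (out : List String) : Prop := out = word_mixer_alt tempList
instance (tempList : List String) (out : List String) : Decidable (Spec_word_mixer tempList out) := by unfold Spec_word_mixer; infer_instance

-- ===== CLAIM (what is proved, stated in full; the proofs are below) =====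
def Claim_equal_word_mixer : Prop := ∀ (tempList : List String), Dom_word_mixer tempList → Spec_word_mixer tempList (word_mixer tempList)

-- ===== LEMMAS AND PROOFS =====

theorem wm_extract_length (s : List String) (i j : Nat) (h2 : j ≤ s.length) :
    (s.extract i j).length = j - i := by
  simp [List.extract_eq_take_drop]; omega

theorem wm_extract_split (s : List String) (i j k : Nat) (h1 : i ≤ j) (h2 : j ≤ k) :
    s.extract i k = s.extract i j ++ s.extract j k := by
  simp only [List.extract_eq_take_drop]
  rw [show k - i = (j - i) + (k - j) by omega, List.take_add, List.drop_drop,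
    show i + (j - i) = j by omega]

theorem wm_extract_cons (s : List String) (i j : Nat) (h1 : i < j) (h2 : j ≤ s.length) :
    s.extract i j = s[i]'(by omega) :: s.extract (i + 1) j := by
  simp only [List.extract_eq_take_drop]
  rw [show j - i = (j - (i + 1)) + 1 by omega]
  conv_lhs => rw [List.drop_eq_getElem_cons (show i < s.length by omega)]
  rw [List.take_succ_cons]

theorem wm_extract_snoc (s : List String) (i j : Nat) (h1 : i ≤ j) (h2 : j < s.length) :
    s.extract i (j + 1) = s.extract i j ++ [s[j]'(by omega)] := by
  simp only [List.extract_eq_take_drop]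
  rw [show j + 1 - i = (j - i) + 1 by omega, List.take_add_one, List.getElem?_drop]
  rw [show i + (j - i) = j by omega]
  simp

theorem wm_pop_neg5 (u : List String) (a b c d e : String) :
    PySem.List.pop? (u ++ [a, b, c, d, e]) (-5) = some (a, u ++ [b, c, d, e]) := by
  simp [PySem.List.pop?, PySem.List.pyIdx?]
  rw [List.eraseIdx_append_of_length_le (by omega)]
  simp

theorem wmRefill_spec (s : List String) (i : Nat) : ∀ (j : Nat) (win : List String),
    win.length ≤ 5 → j ≤ s.length → 5 - win.length ≤ j - i →
    wmRefill s i j win =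
      (j - (5 - win.length), s.extract (j - (5 - win.length)) j ++ win) := by
  intro j win
  fun_induction wmRefill s i j win with
  | case1 j win hc ih =>
    intro hw hj hge
    rw [ih (by simp; omega) (by omega) (by simp; omega)]
    have h1 : j - 1 - (5 - (s.getD (j - 1) "" :: win).length) = j - (5 - win.length) := by
      simp only [List.length_cons]; omega
    have e : s.extract (j - (5 - win.length)) j
        = s.extract (j - (5 - win.length)) (j - 1) ++ [s.getD (j - 1) ""] := by
      have hs := wm_extract_snoc s (j - (5 - win.length)) (j - 1) (by omega) (by omega)
      rw [Nat.sub_add_cancel (by omega)] at hs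
      rw [hs, List.getD_eq_getElem s "" (by omega)]
    rw [h1, e]
    simp
  | case2 j win hc =>
    intro hw hj hge
    have h5 : win.length = 5 := by omega
    simp [h5]

theorem wmLoopA_stop (internal ret : List String) (h : ¬ internal.length > 5) :
    wmLoopA internal ret = ret := by
  unfold wmLoopA
  rw [if_neg h]

theorem wmLoopA_step (u : List String) (x a b c d e : String) (acc : List String) :
    wmLoopA ((x :: u) ++ [a, b, c, d, e]) acc = wmLoopA (u ++ [b, c, d]) (acc ++ [a, x, e]) := by
  conv_lhs => rw [wmLoopA]
  rw [if_pos (by simp)]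
  rw [wm_pop_neg5]
  have h0 : PySem.List.pop? (x :: (u ++ [b, c, d, e])) 0 = some (x, u ++ [b, c, d, e]) :=
    PySem.List.pop?_zero_cons _ _
  have h1 : PySem.List.pop? (u ++ [b, c, d, e]) (-1) = some (e, u ++ [b, c, d]) := by
    have := PySem.List.pop?_last (u ++ [b, c, d]) e
    simpa using this
  split
  next heq => simp at heq
  next a1 l1 heq =>
    rw [Option.some.injEq, Prod.mk.injEq] at heq
    obtain ⟨rfl, rfl⟩ := heq
    simp only [List.cons_append]
    rw [h0]
    split
    next heq2 => simp at heq2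
    next b1 l2 heq2 =>
      rw [Option.some.injEq, Prod.mk.injEq] at heq2
      obtain ⟨rfl, rfl⟩ := heq2
      rw [h1]

theorem wmLoopB_stop (s : List String) (i j : Nat) (win out : List String)
    (h : ¬ (j - i) + win.length > 5) : wmLoopB s i j win out = out := by
  unfold wmLoopB
  rw [if_neg h]

theorem wmLoopB_step (s : List String) (i j j' : Nat) (win out wrest : List String) (a : String)
    (h : (j - i) + win.length > 5) (hr : wmRefill s i j win = (j', a :: wrest)) :
    wmLoopB s i j win out =
      wmLoopB s (i + 1) j' wrest.dropLast (out ++ [a, s.getD i "", wrest.getLastD ""]) := by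
  conv_lhs => rw [wmLoopB]
  rw [if_pos h]
  split
  next j2 win2 heq =>
    rw [hr] at heq
    rw [Prod.mk.injEq] at heq
    obtain ⟨rfl, rfl⟩ := heq
    rfl

theorem wm_list_len5 (l : List String) (h : l.length = 5) :
    ∃ a b c d e : String, l = [a, b, c, d, e] := by
  rcases l with _|⟨a,_|⟨b,_|⟨c,_|⟨d,_|⟨e,_|⟨f,t⟩⟩⟩⟩⟩⟩ <;> simp_all

theorem wm_loop_eq (s : List String) (n : Nat) :
    ∀ (i j : Nat) (win acc : List String), j - i ≤ n → i ≤ j → j ≤ s.length →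
      win.length ≤ 5 → wmLoopA (s.extract i j ++ win) acc = wmLoopB s i j win acc := by
  induction n with
  | zero =>
    intro i j win acc hn hij hj hw
    have hg : ¬ (j - i) + win.length > 5 := by omega
    rw [wmLoopB_stop s i j win acc hg]
    apply wmLoopA_stop
    rw [List.length_append, wm_extract_length s i j hj]
    omega
  | succ n ih =>
    intro i j win acc hn hij hj hw
    by_cases hg : (j - i) + win.length > 5
    · have hw5 : 5 - win.length ≤ j - i := by omega
      have hrs := wmRefill_spec s i j win hw hj hw5
      have hiq : i < j - (5 - win.length) := by omega
      have hqj : j - (5 - win.length) ≤ j := by omega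
      have hlen5 : (s.extract (j - (5 - win.length)) j ++ win).length = 5 := by
        rw [List.length_append, wm_extract_length s _ j hj]
        omega
      obtain ⟨a, b, c, d, e, hwin'⟩ := wm_list_len5 _ hlen5
      rw [hwin'] at hrs
      have hil : i < s.length := by omega
      have hsplit : s.extract i j ++ win
          = (s[i]'hil :: s.extract (i + 1) (j - (5 - win.length))) ++ [a, b, c, d, e] := by
        rw [wm_extract_split s i (j - (5 - win.length)) j (by omega) hqj,
          List.append_assoc, hwin',
          wm_extract_cons s i (j - (5 - win.length)) hiq (by omega)]
      rw [hsplit, wmLoopA_step]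
      rw [wmLoopB_step s i j (j - (5 - win.length)) win acc [b, c, d, e] a hg hrs]
      have hgetD : s.getD i "" = s[i]'hil := List.getD_eq_getElem s "" hil
      simp only [List.dropLast, List.getLastD, hgetD]
      exact ih (i + 1) (j - (5 - win.length)) [b, c, d] (acc ++ [a, s[i]'hil, e])
        (by omega) (by omega) (by omega) (by simp)
    · rw [wmLoopB_stop s i j win acc hg]
      apply wmLoopA_stop
      rw [List.length_append, wm_extract_length s i j hj]
      omega

theorem wm_main (tempList : List String) : word_mixer tempList = word_mixer_alt tempList := by
  unfold word_mixer word_mixer_alt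
  have h := wm_loop_eq (PySem.List.sorted tempList (fun x => x) false)
      (PySem.List.sorted tempList (fun x => x) false).length 0
      (PySem.List.sorted tempList (fun x => x) false).length [] []
      (by omega) (by omega) (by omega) (by simp)
  simpa only [List.extract_eq_take_drop, Nat.sub_zero, List.drop_zero, List.take_length,
    List.append_nil] using h

-- ===== VERDICT (by name: the statement is the Claim_ definition above) =====
theorem word_mixer_spec : Claim_equal_word_mixer := by
  intro tempList _
  unfold Spec_word_mixer
  exact wm_main tempList
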